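-- pv_equiv track=rewrite | github.com/lvalentine6/algorithm_python | programmers/lv1/258712_roy.py | solution
-- ===== SOURCE A (Python) =====
-- def solution(friends, gifts):
--     answer = 0
--
--     dic = {i: {j: 0 for j in friends if not i == j} for i in friends}
--     gift_score = {i: 0 for i in friends}
--     result = {i: 0 for i in friends}
--
--     for gift in gifts:
--         lst = gift.split(' ')
--         dic[lst[0]][lst[1]] += 1
--         gift_score[lst[0]] += 1
--         gift_score[lst[1]] -= 1
--
--     for i in dic:
--         now = dic[i]
--         for target in now:
--             if now[target] > 0 and now[target] > dic[target][i]: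
--                 result[i] += 1
--             elif (now[target] == 0 and dic[target][i] == 0) or now[target] == dic[target][i]:
--                 if gift_score[i] > gift_score[target]:
--                     result[i] += 1
--
--     answer = max(result.values())
--
--     return answer
-- ===== SOURCE B (Python) =====
-- def solution(friends, gifts):
--     pairs = [g.split(' ') for g in gifts]
--     uniq = list(dict.fromkeys(friends))
--
--     def net(x):
--         return sum(1 for p in pairs if p[0] == x) - sum(1 for p in pairs if p[1] == x)
--
--     def beats(i, j):
--         given = sum(1 for p in pairs if p[0] == i and p[1] == j)
--         got = sum(1 for p in pairs if p[0] == j and p[1] == i)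
--         return given > got or (given == got and net(i) > net(j))
--
--     return max(sum(beats(i, j) for j in uniq if j != i) for i in uniq)
-- ===== Notes on version B (the rewrite author's own statement) =====
-- stated objective: alternative
-- what changed: B drops A's nested-dict tallies, gift_score dict and mutated result dict entirely: it keeps only the split gift list and computes each pairwise verdict and each net score by direct counting scans over that list, taking the answer as a max of a sum comprehension with no mutable state.
import Mathlib
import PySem

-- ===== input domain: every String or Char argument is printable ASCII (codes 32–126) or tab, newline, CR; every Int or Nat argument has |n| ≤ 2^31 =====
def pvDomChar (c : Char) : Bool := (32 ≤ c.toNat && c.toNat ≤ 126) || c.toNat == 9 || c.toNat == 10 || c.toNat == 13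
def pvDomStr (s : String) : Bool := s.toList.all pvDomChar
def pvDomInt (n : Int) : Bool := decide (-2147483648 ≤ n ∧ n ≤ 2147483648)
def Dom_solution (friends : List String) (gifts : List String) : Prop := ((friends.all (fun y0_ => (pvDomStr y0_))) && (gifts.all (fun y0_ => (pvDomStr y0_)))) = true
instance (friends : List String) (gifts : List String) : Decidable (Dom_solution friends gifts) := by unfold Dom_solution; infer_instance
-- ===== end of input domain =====

-- B drops A's nested-dict tallies, gift_score dict and mutated result dict entirely:
-- it computes each pairwise verdict and each net score by direct counting scans over the
-- split gift list and returns a max of a sum comprehension, with no mutable state.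
-- Equivalence is about the return value only (neither program mutates its arguments).

-- ===== PORT A =====
-- literal transliteration of Source A; dict lookups `d[k]` are ported as `getD` with a default,
-- which is exact on Pre_ (the key is always present there; outside Pre_ Python raises).
def solution (friends : List String) (gifts : List String) : Int :=
  let dic : PySem.Dict String (PySem.Dict String Int) :=
    friends.foldl (fun d i => d.insert i
      ((friends.filter (fun j => !(i == j))).foldl (fun inner j => inner.insert j 0) PySem.Dict.empty))
      PySem.Dict.empty
  let gift_score : PySem.Dict String Int :=
    friends.foldl (fun d i => d.insert i 0) PySem.Dict.empty
  let result : PySem.Dict String Int :=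
    friends.foldl (fun d i => d.insert i 0) PySem.Dict.empty
  let st := gifts.foldl (fun (s : PySem.Dict String (PySem.Dict String Int) × PySem.Dict String Int) gift =>
      let lst := (PySem.Str.split? gift " ").getD []
      (s.1.modify (PySem.List.pyGetD lst 0 "") PySem.Dict.empty
          (fun inner => inner.modify (PySem.List.pyGetD lst 1 "") 0 (· + 1)),
       (s.2.modify (PySem.List.pyGetD lst 0 "") 0 (· + 1)).modify (PySem.List.pyGetD lst 1 "") 0 (· - 1)))
    (dic, gift_score)
  let dic2 := st.1
  let gs2 := st.2
  let result2 := dic2.keys.foldl (fun res i =>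
      let now := dic2.getD i PySem.Dict.empty
      now.keys.foldl (fun res target =>
        if now.getD target 0 > 0 ∧ now.getD target 0 > (dic2.getD target PySem.Dict.empty).getD i 0 then
          res.modify i 0 (· + 1)
        else if (now.getD target 0 = 0 ∧ (dic2.getD target PySem.Dict.empty).getD i 0 = 0) ∨
                now.getD target 0 = (dic2.getD target PySem.Dict.empty).getD i 0 then
          (if gs2.getD i 0 > gs2.getD target 0 then res.modify i 0 (· + 1) else res)
        else res) res)
    result
  (PySem.List.max? result2.values (fun x => x)).getD 0

-- ===== PORT B =====
-- transliteration of Source B; `p[0]`/`p[1]` are ported as `pyGetD _ _ ""`, exact on Pre_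
-- (every split list there has length ≥ 2; outside Pre_ Python raises IndexError).
def solution_alt (friends : List String) (gifts : List String) : Int :=
  let pairs := gifts.map (fun g => (PySem.Str.split? g " ").getD [])
  let uniq := PySem.List.dedup friends
  let net := fun (x : String) =>
    ((pairs.countP (fun p => PySem.List.pyGetD p 0 "" == x) : Nat) : Int) -
    ((pairs.countP (fun p => PySem.List.pyGetD p 1 "" == x) : Nat) : Int)
  let beats := fun (i j : String) =>
    let given : Int := ((pairs.countP (fun p => PySem.List.pyGetD p 0 "" == i && PySem.List.pyGetD p 1 "" == j) : Nat) : Int)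
    let got : Int := ((pairs.countP (fun p => PySem.List.pyGetD p 0 "" == j && PySem.List.pyGetD p 1 "" == i) : Nat) : Int)
    decide (got < given) || (decide (given = got) && decide (net j < net i))
  (PySem.List.max? (uniq.map (fun i =>
      (((uniq.filter (fun j => !(j == i))).countP (fun j => beats i j) : Nat) : Int)))
    (fun x => x)).getD 0

-- ===== PRECONDITION & SPEC =====
-- Pre_ is exactly where the Python A returns: a nonempty friend list (max() of an empty dict
-- raises ValueError) and every gift line splitting into at least two tokens whose first two
-- are distinct members of friends (otherwise IndexError/KeyError).
def Pre_solution (friends : List String) (gifts : List String) : Prop :=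
  friends ≠ [] ∧ ∀ g ∈ gifts,
    2 ≤ ((PySem.Str.split? g " ").getD []).length ∧
    PySem.List.pyGetD ((PySem.Str.split? g " ").getD []) 0 "" ∈ friends ∧
    PySem.List.pyGetD ((PySem.Str.split? g " ").getD []) 1 "" ∈ friends ∧
    PySem.List.pyGetD ((PySem.Str.split? g " ").getD []) 0 "" ≠
      PySem.List.pyGetD ((PySem.Str.split? g " ").getD []) 1 ""
instance (friends : List String) (gifts : List String) : Decidable (Pre_solution friends gifts) := by
  unfold Pre_solution; infer_instance

def pvWitness_solution : List String × List String := (["a", "b"], ["a b"])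

def Spec_solution (friends : List String) (gifts : List String) (out : Int) : Prop := out = solution_alt friends gifts
instance (friends : List String) (gifts : List String) (out : Int) : Decidable (Spec_solution friends gifts out) := by unfold Spec_solution; infer_instance

-- ===== CLAIM (what is proved, stated in full; the proofs are below) =====
def Claim_equal_solution : Prop := ∀ (friends : List String) (gifts : List String), Dom_solution friends gifts → Pre_solution friends gifts → Spec_solution friends gifts (solution friends gifts)

-- ===== LEMMAS AND PROOFS =====

-- spec-side descriptions of what both programs decide per ordered pair
def pvP0 (g : String) : String := PySem.List.pyGetD ((PySem.Str.split? g " ").getD []) 0 ""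
def pvP1 (g : String) : String := PySem.List.pyGetD ((PySem.Str.split? g " ").getD []) 1 ""
def pvKey (g : String) : String × String := (pvP0 g, pvP1 g)
def pvCnt (gifts : List String) (a b : String) : Int := ((gifts.map pvKey).count (a, b) : Int)
def pvScore (gifts : List String) (a : String) : Int :=
  (gifts.countP (fun g => pvP0 g == a) : Int) - (gifts.countP (fun g => pvP1 g == a) : Int)
def pvPoint (gifts : List String) (a b : String) : Bool :=
  decide (pvCnt gifts b a < pvCnt gifts a b) ||
  (decide (pvCnt gifts a b = pvCnt gifts b a) && decide (pvScore gifts b < pvScore gifts a))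

-- proof-side names for A's intermediate states
def pvFdic (d : PySem.Dict String (PySem.Dict String Int)) (g : String) : PySem.Dict String (PySem.Dict String Int) :=
  d.modify (pvP0 g) PySem.Dict.empty (fun inner => inner.modify (pvP1 g) 0 (· + 1))
def pvFsc (s : PySem.Dict String Int) (g : String) : PySem.Dict String Int :=
  (s.modify (pvP0 g) 0 (· + 1)).modify (pvP1 g) 0 (· - 1)
def pvZ0 (xs : List String) : PySem.Dict String Int :=
  xs.foldl (fun d i => d.insert i 0) PySem.Dict.empty
def pvDic0 (friends : List String) : PySem.Dict String (PySem.Dict String Int) :=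
  friends.foldl (fun d i => d.insert i
    ((friends.filter (fun j => !(i == j))).foldl (fun inner j => inner.insert j 0) PySem.Dict.empty))
    PySem.Dict.empty
def pvDicF (friends gifts : List String) : PySem.Dict String (PySem.Dict String Int) :=
  gifts.foldl pvFdic (pvDic0 friends)
def pvScF (friends gifts : List String) : PySem.Dict String Int := gifts.foldl pvFsc (pvZ0 friends)
def pvResA (friends gifts : List String) : PySem.Dict String Int :=
  (pvDicF friends gifts).keys.foldl (fun res i =>
    ((pvDicF friends gifts).getD i PySem.Dict.empty).keys.foldl (fun res target =>
      if ((pvDicF friends gifts).getD i PySem.Dict.empty).getD target 0 > 0 ∧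
          ((pvDicF friends gifts).getD i PySem.Dict.empty).getD target 0 >
            ((pvDicF friends gifts).getD target PySem.Dict.empty).getD i 0 then
        res.modify i 0 (· + 1)
      else if (((pvDicF friends gifts).getD i PySem.Dict.empty).getD target 0 = 0 ∧
            ((pvDicF friends gifts).getD target PySem.Dict.empty).getD i 0 = 0) ∨
          ((pvDicF friends gifts).getD i PySem.Dict.empty).getD target 0 =
            ((pvDicF friends gifts).getD target PySem.Dict.empty).getD i 0 then
        (if (pvScF friends gifts).getD i 0 > (pvScF friends gifts).getD target 0 then
          res.modify i 0 (· + 1) else res)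
      else res) res)
    (pvZ0 friends)
def pvVal (friends gifts : List String) (i : String) : Int :=
  (((PySem.Set.ofList friends).filter (fun t => !(t == i))).countP (fun t => pvPoint gifts i t) : Int)

-- generic dict/set facts specific to A's loop shapes
theorem pvKeys_insert {ν : Type} (d : PySem.Dict String ν) (k : String) (v : ν) :
    (d.insert k v).keys = PySem.Set.add d.keys k := by
  by_cases h : d.contains k = true
  · rw [PySem.Dict.keys_insert_of_contains d v h]
    have hm : k ∈ d.keys := (PySem.Dict.contains_iff_mem_keys d k).mp h
    simp [PySem.Set.add, PySem.Set.contains, hm]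
  · have h' : d.contains k = false := by simpa using h
    rw [PySem.Dict.keys_insert_of_not_contains d v h']
    have hm : k ∉ d.keys := fun hmem => h ((PySem.Dict.contains_iff_mem_keys d k).mpr hmem)
    simp [PySem.Set.add, PySem.Set.contains, hm]

theorem pvKeys_modify_mem {ν : Type} (d : PySem.Dict String ν) (k : String) (d0 : ν) (f : ν → ν)
    (h : k ∈ d.keys) : (d.modify k d0 f).keys = d.keys := by
  rw [PySem.Dict.keys_modify, PySem.Dict.keys_insert_of_contains]
  exact (PySem.Dict.contains_iff_mem_keys d k).mpr h

theorem pvUpdate_nop (xs : List String) (s : PySem.Set String) (h : ∀ x ∈ xs, x ∈ s) :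
    PySem.Set.update s xs = s := by
  induction xs generalizing s with
  | nil => rfl
  | cons x xs ih =>
    have hx : PySem.Set.add s x = s := by
      simp [PySem.Set.add, PySem.Set.contains, h x (by simp)]
    have hstep : PySem.Set.update s (x :: xs) = PySem.Set.update (PySem.Set.add s x) xs := rfl
    rw [hstep, hx]
    exact ih s (fun y hy => h y (by simp [hy]))

theorem pvGetD_foldl_insert {ν : Type} (v : String → ν) (dflt : ν) :
    ∀ (xs : List String) (d : PySem.Dict String ν) (a : String),
    (xs.foldl (fun d x => d.insert x (v x)) d).getD a dflt =
      if a ∈ xs then v a else d.getD a dflt := by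
  intro xs
  induction xs with
  | nil => intro d a; simp
  | cons x xs ih =>
    intro d a
    rw [List.foldl_cons, ih]
    by_cases h1 : a ∈ xs <;> by_cases h2 : a = x <;>
      simp [h1, h2, PySem.Dict.getD_insert]

theorem pvGetD_init_zero (xs : List String) (a : String) :
    (xs.foldl (fun d i => d.insert i 0) PySem.Dict.empty).getD a (0 : Int) = 0 := by
  have h := pvGetD_foldl_insert (ν := Int) (fun _ => 0) 0 xs PySem.Dict.empty a
  simpa [PySem.Dict.getD_empty] using h

-- the gift loop, score side
theorem pvScore_fold :
    ∀ (l : List String) (s : PySem.Dict String Int) (a : String),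
    (l.foldl (fun s g => (s.modify (pvP0 g) 0 (· + 1)).modify (pvP1 g) 0 (· - 1)) s).getD a 0 =
      s.getD a 0 + (l.countP (fun g => pvP0 g == a) : Int) - (l.countP (fun g => pvP1 g == a) : Int) := by
  intro l
  induction l with
  | nil => intro s a; simp
  | cons g l ih =>
    intro s a
    rw [List.foldl_cons, ih]
    clear ih
    rw [PySem.Dict.getD_modify, PySem.Dict.getD_modify, PySem.Dict.getD_modify]
    simp only [List.countP_cons, beq_iff_eq]
    split_ifs <;> subst_vars <;> simp_all <;> omega

-- the gift loop, dic side: per-pair counts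
theorem pvDic_cnt :
    ∀ (l : List String) (d : PySem.Dict String (PySem.Dict String Int)) (a b : String),
    ((l.foldl (fun d g => d.modify (pvP0 g) PySem.Dict.empty
        (fun inner => inner.modify (pvP1 g) 0 (· + 1))) d).getD a PySem.Dict.empty).getD b 0 =
      (d.getD a PySem.Dict.empty).getD b 0 + (l.countP (fun g => pvKey g == (a, b)) : Int) := by
  intro l
  induction l with
  | nil => intro d a b; simp
  | cons g l ih =>
    intro d a b
    rw [List.foldl_cons, ih]
    rw [PySem.Dict.getD_modify]
    simp only [List.countP_cons, pvKey, beq_iff_eq, Prod.mk.injEq]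
    by_cases h0 : a = pvP0 g
    · rw [if_pos h0, PySem.Dict.getD_modify, ← h0]
      by_cases h1 : b = pvP1 g
      · rw [if_pos h1, h1]
        simp
        omega
      · rw [if_neg h1]
        have hc : ¬ (a = a ∧ pvP1 g = b) := fun h => h1 h.2.symm
        rw [if_neg hc]
        simp
    · rw [if_neg h0]
      have hc : ¬ (pvP0 g = a ∧ pvP1 g = b) := fun h => h0 h.1.symm
      rw [if_neg hc]
      simp

-- the gift loop, dic side: inner key lists
theorem pvDic_keys :
    ∀ (l : List String) (d : PySem.Dict String (PySem.Dict String Int)) (a : String),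
    ((l.foldl (fun d g => d.modify (pvP0 g) PySem.Dict.empty
        (fun inner => inner.modify (pvP1 g) 0 (· + 1))) d).getD a PySem.Dict.empty).keys =
      PySem.Set.update ((d.getD a PySem.Dict.empty).keys) ((l.filter (fun g => pvP0 g == a)).map pvP1) := by
  intro l
  induction l with
  | nil => intro d a; rfl
  | cons g l ih =>
    intro d a
    rw [List.foldl_cons, ih]
    rw [PySem.Dict.getD_modify]
    by_cases h0 : a = pvP0 g
    · rw [if_pos h0, List.filter_cons, if_pos (by simp [← h0]), List.map_cons, ← h0]
      have hk : ((d.getD a PySem.Dict.empty).modify (pvP1 g) 0 (· + 1)).keys =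
          PySem.Set.add (d.getD a PySem.Dict.empty).keys (pvP1 g) := by
        rw [PySem.Dict.keys_modify, pvKeys_insert]
      rw [hk]
      rfl
    · rw [if_neg h0, List.filter_cons, if_neg (by simp; exact fun h => h0 h.symm)]

-- A's inner tally loop over one row
theorem pvResInner (p1 p2 p3 : String → Prop) [DecidablePred p1] [DecidablePred p2] [DecidablePred p3]
    (i : String) :
    ∀ (ts : List String) (r : PySem.Dict String Int) (j : String),
    (ts.foldl (fun res t => if p1 t then res.modify i 0 (· + 1)
        else if p2 t then (if p3 t then res.modify i 0 (· + 1) else res) else res) r).getD j 0 =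
      r.getD j 0 + (if j = i then
        (ts.countP (fun t => decide (p1 t) || (decide (p2 t) && decide (p3 t))) : Int) else 0) := by
  intro ts
  induction ts with
  | nil => intro r j; simp
  | cons t ts ih =>
    intro r j
    rw [List.foldl_cons, ih]
    have hstep : (if p1 t then r.modify i 0 (· + 1)
        else if p2 t then (if p3 t then r.modify i 0 (· + 1) else r) else r).getD j 0 =
        r.getD j 0 + (if j = i then (if decide (p1 t) || (decide (p2 t) && decide (p3 t)) then 1 else 0) else 0) := by
      split_ifs <;> simp_all [PySem.Dict.getD_modify]
    rw [hstep]
    simp only [List.countP_cons]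
    split_ifs <;> push_cast <;> omega

theorem pvResInner_keys (p1 p2 p3 : String → Prop) [DecidablePred p1] [DecidablePred p2] [DecidablePred p3]
    (i : String) :
    ∀ (ts : List String) (r : PySem.Dict String Int), i ∈ r.keys →
    (ts.foldl (fun res t => if p1 t then res.modify i 0 (· + 1)
        else if p2 t then (if p3 t then res.modify i 0 (· + 1) else res) else res) r).keys = r.keys := by
  intro ts
  induction ts with
  | nil => intro r hr; simp
  | cons t ts ih =>
    intro r hr
    rw [List.foldl_cons]
    have hstep : (if p1 t then r.modify i 0 (· + 1)
        else if p2 t then (if p3 t then r.modify i 0 (· + 1) else r) else r).keys = r.keys := by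
      split_ifs <;> first | rw [pvKeys_modify_mem _ _ _ _ hr] | rfl
    rw [ih _ (by rw [hstep]; exact hr), hstep]

-- A's outer loop, generic over the row body
theorem pvResOuter (val : String → Int)
    (body : PySem.Dict String Int → String → PySem.Dict String Int)
    (hval : ∀ r i j, (body r i).getD j 0 = r.getD j 0 + (if j = i then val i else 0)) :
    ∀ (I : List String) (r : PySem.Dict String Int) (j : String), I.Nodup →
    (I.foldl body r).getD j 0 = r.getD j 0 + (if j ∈ I then val j else 0) := by
  intro I
  induction I with
  | nil => intro r j _; simp
  | cons i I ih =>
    intro r j hnd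
    rw [List.foldl_cons, ih _ _ hnd.of_cons, hval]
    by_cases hji : j = i
    · subst hji
      simp [(List.nodup_cons.mp hnd).1]
    · simp [hji]

theorem pvResOuter_keys (body : PySem.Dict String Int → String → PySem.Dict String Int)
    (hkeys : ∀ r i, i ∈ r.keys → (body r i).keys = r.keys) :
    ∀ (I : List String) (r : PySem.Dict String Int), (∀ i ∈ I, i ∈ r.keys) →
    (I.foldl body r).keys = r.keys := by
  intro I
  induction I with
  | nil => intro r _; simp
  | cons i I ih =>
    intro r h
    rw [List.foldl_cons]
    have hk : (body r i).keys = r.keys := hkeys r i (h i (by simp))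
    rw [ih _ (fun x hx => by rw [hk]; exact h x (by simp [hx])), hk]

-- B's counting scans, described by the spec-side counts
theorem pvB_cnt (gifts : List String) (i j : String) :
    (((gifts.map (fun g => (PySem.Str.split? g " ").getD [])).countP
        (fun p => PySem.List.pyGetD p 0 "" == i && PySem.List.pyGetD p 1 "" == j) : Nat) : Int) =
      pvCnt gifts i j := by
  simp only [pvCnt, List.count_eq_countP, List.countP_map]
  norm_cast

theorem pvB_net (gifts : List String) (x : String) :
    (((gifts.map (fun g => (PySem.Str.split? g " ").getD [])).countP
        (fun p => PySem.List.pyGetD p 0 "" == x) : Nat) : Int) -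
      (((gifts.map (fun g => (PySem.Str.split? g " ").getD [])).countP
        (fun p => PySem.List.pyGetD p 1 "" == x) : Nat) : Int) =
      pvScore gifts x := by
  simp only [pvScore, List.countP_map]
  rfl

theorem pvMain (friends gifts : List String) (hpre : Pre_solution friends gifts) :
    solution friends gifts = solution_alt friends gifts := by
  obtain ⟨hne, hg⟩ := hpre
  have hstA : gifts.foldl (fun (s : PySem.Dict String (PySem.Dict String Int) × PySem.Dict String Int) g =>
      (pvFdic s.1 g, pvFsc s.2 g)) (pvDic0 friends, pvZ0 friends)
      = (pvDicF friends gifts, pvScF friends gifts) :=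
    PySem.List.foldl_prod_mk pvFdic pvFsc gifts _ _
  have eA : solution friends gifts =
      (PySem.List.max? (pvResA friends gifts).values (fun x => x)).getD 0 := by
    have e1 : solution friends gifts =
        (fun st : PySem.Dict String (PySem.Dict String Int) × PySem.Dict String Int =>
          (PySem.List.max? ((st.1.keys.foldl (fun res i =>
            (st.1.getD i PySem.Dict.empty).keys.foldl (fun res target =>
              if (st.1.getD i PySem.Dict.empty).getD target 0 > 0 ∧
                  (st.1.getD i PySem.Dict.empty).getD target 0 >
                    (st.1.getD target PySem.Dict.empty).getD i 0 then
                res.modify i 0 (· + 1)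
              else if ((st.1.getD i PySem.Dict.empty).getD target 0 = 0 ∧
                    (st.1.getD target PySem.Dict.empty).getD i 0 = 0) ∨
                  (st.1.getD i PySem.Dict.empty).getD target 0 =
                    (st.1.getD target PySem.Dict.empty).getD i 0 then
                (if st.2.getD i 0 > st.2.getD target 0 then res.modify i 0 (· + 1) else res)
              else res) res)
            (pvZ0 friends)).values) (fun x => x)).getD 0)
        (gifts.foldl (fun s g => (pvFdic s.1 g, pvFsc s.2 g)) (pvDic0 friends, pvZ0 friends)) := rfl
    rw [e1, hstA]
    rfl
  have hF : (PySem.Set.ofList friends).Nodup := PySem.Set.nodup_ofList friends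
  have hFm : ∀ x, x ∈ PySem.Set.ofList friends ↔ x ∈ friends := fun x => PySem.Set.mem_ofList friends x
  have hz0keys : ∀ xs : List String, (pvZ0 xs).keys = PySem.Set.ofList xs := by
    intro xs
    have h : (pvZ0 xs).keys = PySem.Set.update PySem.Dict.empty.keys xs :=
      PySem.Dict.keys_foldl_insert xs (fun _ _ => (0 : Int)) PySem.Dict.empty
    rw [h]
    rfl
  have hz0getD : ∀ (xs : List String) a, (pvZ0 xs).getD a 0 = 0 := fun xs a => pvGetD_init_zero xs a
  have hdic0 : ∀ a b, ((pvDic0 friends).getD a PySem.Dict.empty).getD b 0 = 0 := by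
    intro a b
    have h : (pvDic0 friends).getD a PySem.Dict.empty =
        (if a ∈ friends then
          (friends.filter (fun j => !(a == j))).foldl (fun inner j => inner.insert j 0) PySem.Dict.empty
        else PySem.Dict.empty.getD a PySem.Dict.empty) :=
      pvGetD_foldl_insert (ν := PySem.Dict String Int)
        (fun i => (friends.filter (fun j => !(i == j))).foldl (fun inner j => inner.insert j 0) PySem.Dict.empty)
        PySem.Dict.empty friends PySem.Dict.empty a
    rw [h]
    split_ifs with hmem
    · exact pvGetD_init_zero _ b
    · simp [PySem.Dict.getD_empty]
  have hcntA : ∀ a b, ((pvDicF friends gifts).getD a PySem.Dict.empty).getD b 0 = pvCnt gifts a b := by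
    intro a b
    have h : ((pvDicF friends gifts).getD a PySem.Dict.empty).getD b 0 =
        ((pvDic0 friends).getD a PySem.Dict.empty).getD b 0 +
          (gifts.countP (fun g => pvKey g == (a, b)) : Int) :=
      pvDic_cnt gifts (pvDic0 friends) a b
    rw [h, hdic0 a b]
    simp only [pvCnt, List.count_eq_countP, List.countP_map, zero_add]
    rfl
  have hscA : ∀ a, (pvScF friends gifts).getD a 0 = pvScore gifts a := by
    intro a
    have h : (pvScF friends gifts).getD a 0 = (pvZ0 friends).getD a 0 +
        (gifts.countP (fun g => pvP0 g == a) : Int) - (gifts.countP (fun g => pvP1 g == a) : Int) :=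
      pvScore_fold gifts (pvZ0 friends) a
    rw [h, hz0getD, pvScore]
    ring
  have hKdic : (pvDicF friends gifts).keys = PySem.Set.ofList friends := by
    have h1 : (pvDic0 friends).keys = PySem.Set.ofList friends := by
      have h : (pvDic0 friends).keys = PySem.Set.update PySem.Dict.empty.keys friends :=
        PySem.Dict.keys_foldl_insert friends
          ((fun _ i => (friends.filter (fun j => !(i == j))).foldl
            (fun inner j => inner.insert j (0 : Int)) PySem.Dict.empty) :
            PySem.Dict String (PySem.Dict String Int) → String → PySem.Dict String Int)
          PySem.Dict.empty
      rw [h]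
      rfl
    have h2 : (pvDicF friends gifts).keys = PySem.Set.update (pvDic0 friends).keys (gifts.map pvP0) :=
      PySem.Dict.keys_foldl_modify_key gifts pvP0 PySem.Dict.empty
        (fun _ g => fun inner => inner.modify (pvP1 g) 0 (· + 1)) (pvDic0 friends)
    rw [h2, h1]
    apply pvUpdate_nop
    intro x hx
    obtain ⟨g, hgm, rfl⟩ := List.mem_map.mp hx
    exact (hFm _).mpr (hg g hgm).2.1
  have hKinn : ∀ i, i ∈ friends → ((pvDicF friends gifts).getD i PySem.Dict.empty).keys =
      PySem.Set.ofList (friends.filter (fun j => !(i == j))) := by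
    intro i hi
    have h3 : ((pvDicF friends gifts).getD i PySem.Dict.empty).keys =
        PySem.Set.update (((pvDic0 friends).getD i PySem.Dict.empty).keys)
          ((gifts.filter (fun g => pvP0 g == i)).map pvP1) :=
      pvDic_keys gifts (pvDic0 friends) i
    have h4 : (pvDic0 friends).getD i PySem.Dict.empty =
        (if i ∈ friends then
          (friends.filter (fun j => !(i == j))).foldl (fun inner j => inner.insert j 0) PySem.Dict.empty
        else PySem.Dict.empty.getD i PySem.Dict.empty) :=
      pvGetD_foldl_insert (ν := PySem.Dict String Int)
        (fun i2 => (friends.filter (fun j => !(i2 == j))).foldl (fun inner j => inner.insert j 0) PySem.Dict.empty)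
        PySem.Dict.empty friends PySem.Dict.empty i
    rw [if_pos hi] at h4
    have h5 : ((friends.filter (fun j => !(i == j))).foldl
        (fun inner j => inner.insert j (0 : Int)) PySem.Dict.empty).keys =
        PySem.Set.update PySem.Dict.empty.keys (friends.filter (fun j => !(i == j))) :=
      PySem.Dict.keys_foldl_insert _ (fun _ _ => (0 : Int)) PySem.Dict.empty
    rw [h3, h4, h5]
    have h6 : PySem.Set.update (PySem.Dict.empty : PySem.Dict String Int).keys
        (friends.filter (fun j => !(i == j))) =
        PySem.Set.ofList (friends.filter (fun j => !(i == j))) := rfl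
    rw [h6]
    apply pvUpdate_nop
    intro x hx
    obtain ⟨g, hgm, rfl⟩ := List.mem_map.mp hx
    obtain ⟨hgg, hp0i⟩ := List.mem_filter.mp hgm
    have h7 := hg g hgg
    have hp0 : pvP0 g = i := by simpa using hp0i
    rw [PySem.Set.mem_ofList]
    refine List.mem_filter.mpr ⟨h7.2.2.1, ?_⟩
    simp only [Bool.not_eq_eq_eq_not, Bool.not_true, beq_eq_false_iff_ne, ne_eq]
    exact fun h => h7.2.2.2 (hp0.trans h)
  have hpt : ∀ i t,
      (decide (((pvDicF friends gifts).getD i PySem.Dict.empty).getD t 0 > 0 ∧ ((pvDicF friends gifts).getD i PySem.Dict.empty).getD t 0 > ((pvDicF friends gifts).getD t PySem.Dict.empty).getD i 0) ||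
       (decide ((((pvDicF friends gifts).getD i PySem.Dict.empty).getD t 0 = 0 ∧ ((pvDicF friends gifts).getD t PySem.Dict.empty).getD i 0 = 0) ∨ ((pvDicF friends gifts).getD i PySem.Dict.empty).getD t 0 = ((pvDicF friends gifts).getD t PySem.Dict.empty).getD i 0) && decide ((pvScF friends gifts).getD i 0 > (pvScF friends gifts).getD t 0))) = pvPoint gifts i t := by
    intro i t
    rw [hcntA i t, hcntA t i, hscA i, hscA t]
    have h0 : (0 : Int) ≤ pvCnt gifts t i := Int.natCast_nonneg _
    rw [Bool.eq_iff_iff]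
    simp only [pvPoint, Bool.or_eq_true, Bool.and_eq_true, decide_eq_true_eq, gt_iff_lt]
    omega
  have hRA : ∀ j, (pvResA friends gifts).getD j 0 =
      (if j ∈ PySem.Set.ofList friends then
        ((((pvDicF friends gifts).getD j PySem.Dict.empty).keys.countP (fun t => pvPoint gifts j t) : Nat) : Int)
      else 0) := by
    intro j
    have h : (pvResA friends gifts).getD j 0 = (pvZ0 friends).getD j 0 +
        (if j ∈ (pvDicF friends gifts).keys then
          (fun i => ((((pvDicF friends gifts).getD i PySem.Dict.empty).keys.countP (fun t =>
        decide (((pvDicF friends gifts).getD i PySem.Dict.empty).getD t 0 > 0 ∧ ((pvDicF friends gifts).getD i PySem.Dict.empty).getD t 0 > ((pvDicF friends gifts).getD t PySem.Dict.empty).getD i 0) ||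
        (decide ((((pvDicF friends gifts).getD i PySem.Dict.empty).getD t 0 = 0 ∧ ((pvDicF friends gifts).getD t PySem.Dict.empty).getD i 0 = 0) ∨ ((pvDicF friends gifts).getD i PySem.Dict.empty).getD t 0 = ((pvDicF friends gifts).getD t PySem.Dict.empty).getD i 0) && decide ((pvScF friends gifts).getD i 0 > (pvScF friends gifts).getD t 0)))) : Int)) j
        else 0) :=
      pvResOuter _ (fun res i =>
        ((pvDicF friends gifts).getD i PySem.Dict.empty).keys.foldl (fun res target =>
          if ((pvDicF friends gifts).getD i PySem.Dict.empty).getD target 0 > 0 ∧ ((pvDicF friends gifts).getD i PySem.Dict.empty).getD target 0 > ((pvDicF friends gifts).getD target PySem.Dict.empty).getD i 0 then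
            res.modify i 0 (· + 1)
          else if (((pvDicF friends gifts).getD i PySem.Dict.empty).getD target 0 = 0 ∧ ((pvDicF friends gifts).getD target PySem.Dict.empty).getD i 0 = 0) ∨ ((pvDicF friends gifts).getD i PySem.Dict.empty).getD target 0 = ((pvDicF friends gifts).getD target PySem.Dict.empty).getD i 0 then
            (if (pvScF friends gifts).getD i 0 > (pvScF friends gifts).getD target 0 then res.modify i 0 (· + 1) else res)
          else res) res)
        (fun r i j2 => pvResInner _ _ _ i (((pvDicF friends gifts).getD i PySem.Dict.empty).keys) r j2)
        (pvDicF friends gifts).keys (pvZ0 friends) j (by rw [hKdic]; exact hF)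
    rw [h, hz0getD, hKdic, zero_add]
    by_cases hj : j ∈ PySem.Set.ofList friends
    · rw [if_pos hj, if_pos hj]
      beta_reduce
      norm_cast
      refine List.countP_congr ?_
      intro t _
      rw [hpt j t]
    · rw [if_neg hj, if_neg hj]
  have hVal : ∀ j, j ∈ friends →
      ((((pvDicF friends gifts).getD j PySem.Dict.empty).keys.countP (fun t => pvPoint gifts j t) : Nat) : Int) =
        pvVal friends gifts j := by
    intro j hj
    rw [hKinn j hj]
    have hperm : (PySem.Set.ofList (friends.filter (fun t => !(j == t)))).Perm
        ((PySem.Set.ofList friends).filter (fun t => !(t == j))) := by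
      rw [List.perm_ext_iff_of_nodup (PySem.Set.nodup_ofList _) (hF.filter _)]
      intro x
      constructor
      · intro hx
        obtain ⟨hxf, hbx⟩ := List.mem_filter.mp ((PySem.Set.mem_ofList _ _).mp hx)
        refine List.mem_filter.mpr ⟨(hFm x).mpr hxf, ?_⟩
        simp only [Bool.not_eq_eq_eq_not, Bool.not_true, beq_eq_false_iff_ne, ne_eq] at hbx ⊢
        exact fun h => hbx h.symm
      · intro hx
        obtain ⟨hxF, hbx⟩ := List.mem_filter.mp hx
        refine (PySem.Set.mem_ofList _ _).mpr (List.mem_filter.mpr ⟨(hFm x).mp hxF, ?_⟩)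
        simp only [Bool.not_eq_eq_eq_not, Bool.not_true, beq_eq_false_iff_ne, ne_eq] at hbx ⊢
        exact fun h => hbx h.symm
    unfold pvVal
    rw [List.Perm.countP_eq _ hperm]
  have hvaluesA : (pvResA friends gifts).values =
      (PySem.Set.ofList friends).map (fun j => pvVal friends gifts j) := by
    have hkRA : (pvResA friends gifts).keys = PySem.Set.ofList friends := by
      have h : (pvResA friends gifts).keys = (pvZ0 friends).keys :=
        pvResOuter_keys (fun res i =>
        ((pvDicF friends gifts).getD i PySem.Dict.empty).keys.foldl (fun res target =>
          if ((pvDicF friends gifts).getD i PySem.Dict.empty).getD target 0 > 0 ∧ ((pvDicF friends gifts).getD i PySem.Dict.empty).getD target 0 > ((pvDicF friends gifts).getD target PySem.Dict.empty).getD i 0 then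
            res.modify i 0 (· + 1)
          else if (((pvDicF friends gifts).getD i PySem.Dict.empty).getD target 0 = 0 ∧ ((pvDicF friends gifts).getD target PySem.Dict.empty).getD i 0 = 0) ∨ ((pvDicF friends gifts).getD i PySem.Dict.empty).getD target 0 = ((pvDicF friends gifts).getD target PySem.Dict.empty).getD i 0 then
            (if (pvScF friends gifts).getD i 0 > (pvScF friends gifts).getD target 0 then res.modify i 0 (· + 1) else res)
          else res) res)
          (fun r i hi => pvResInner_keys _ _ _ i (((pvDicF friends gifts).getD i PySem.Dict.empty).keys) r hi)
          (pvDicF friends gifts).keys (pvZ0 friends)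
          (by rw [hKdic, hz0keys]; exact fun i h => h)
      rw [h, hz0keys]
    rw [PySem.Dict.values_eq_map_keys _ (by rw [hkRA]; exact hF) 0, hkRA]
    apply List.map_congr_left
    intro j hj
    rw [hRA j, if_pos hj, hVal j ((hFm j).mp hj)]
  -- B side: the counting scans compute pvCnt / pvScore directly
  have eB : solution_alt friends gifts =
      (PySem.List.max? ((PySem.Set.ofList friends).map (fun j => pvVal friends gifts j)) (fun x => x)).getD 0 := by
    simp only [solution_alt, PySem.List.dedup_eq_ofList]
    refine congrArg (fun l => (PySem.List.max? l (fun x => x)).getD 0) ?_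
    apply List.map_congr_left
    intro i _
    unfold pvVal
    refine congrArg (fun n : Nat => (n : Int)) ?_
    refine List.countP_congr ?_
    intro t _
    rw [Bool.eq_iff_iff]
    simp only [pvPoint, Bool.or_eq_true, Bool.and_eq_true, decide_eq_true_eq]
    rw [pvB_cnt gifts i t, pvB_cnt gifts t i, pvB_net gifts i, pvB_net gifts t]
    tauto
  rw [eA, eB, hvaluesA]

-- ===== VERDICT (by name: the statement is the Claim_ definition above) =====
theorem solution_spec : Claim_equal_solution := by
  intro friends gifts _ hpre
  exact pvMain friends gifts hpre
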